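-- pv_equiv track=rewrite | github.com/greghaynes/dib2cloud | dib2cloud/config.py | _filter_sequence
-- ===== SOURCE A (Python) =====
-- class ConfigMultipleItemsError(Exception):
--     pass
--
-- def _filter_sequence(sequence, prop, val):
--     ret = None
--     found = False
--     for item in sequence:
--         if item.get(prop) == val:
--             if not found:
--                 ret = item
--                 found = True
--             else:
--                 raise ConfigMultipleItemsError(
--                     'Multiple items with property %s=%s' % (prop, val)
--                 )
--     return found, ret
-- ===== SOURCE B (Python) =====
-- class ConfigMultipleItemsError(Exception):
--     pass
--
-- def _filter_sequence(sequence, prop, val):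
--     # Build an index grouping every item by its value for `prop`,
--     # then answer with a single dictionary lookup.
--     index = {}
--     for item in sequence:
--         k = item.get(prop)
--         index[k] = index.get(k, []) + [item]
--     ms = index.get(val, [])
--     if len(ms) > 1:
--         raise ConfigMultipleItemsError(
--             'Multiple items with property %s=%s' % (prop, val)
--         )
--     return bool(ms), ms[0] if ms else None
-- ===== Notes on version B (the rewrite author's own statement) =====
-- stated objective: alternative
-- what changed: B replaces A's inline found-flag duplicate-detecting scan with a grouping index: one pass builds a dict mapping each property value to its list of items, and the answer is then a single dict lookup followed by a length check.
import Mathlib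
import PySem

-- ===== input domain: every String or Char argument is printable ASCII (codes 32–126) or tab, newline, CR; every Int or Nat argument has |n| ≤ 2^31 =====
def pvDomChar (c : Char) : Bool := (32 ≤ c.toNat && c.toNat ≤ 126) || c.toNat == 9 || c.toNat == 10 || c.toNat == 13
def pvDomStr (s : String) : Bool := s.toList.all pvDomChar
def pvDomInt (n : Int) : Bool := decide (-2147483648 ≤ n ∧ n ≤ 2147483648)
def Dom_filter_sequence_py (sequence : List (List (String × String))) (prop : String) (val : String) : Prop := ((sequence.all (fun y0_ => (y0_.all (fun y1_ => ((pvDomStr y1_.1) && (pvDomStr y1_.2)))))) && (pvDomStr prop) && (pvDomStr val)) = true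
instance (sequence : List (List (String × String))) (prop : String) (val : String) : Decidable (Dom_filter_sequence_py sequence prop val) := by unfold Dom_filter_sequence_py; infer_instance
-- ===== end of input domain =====

-- ===== PORT A =====
-- B replaces A's found-flag duplicate-detecting scan with a grouping dict index plus one lookup; return values proved equal wherever A returns (Pre_ excludes the multiple-match inputs on which both raise).
-- item.get(prop) on the dict item (assoc list, first match wins)
def pvItemGet (item : List (String × String)) (prop : String) : Option String :=
  (PySem.Dict.mk item).get? prop

-- the scan of A: state (ret, found); the 'raise' branch (second match) is outside Pre_,
-- where the port returns the current state (never reached inside Pre_).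
def pvGoA (prop val : String) : List (List (String × String)) → Option (List (String × String)) → Bool → Bool × (Option (List (String × String)))
  | [], ret, found => (found, ret)
  | item :: rest, ret, found =>
      if pvItemGet item prop == some val then
        if !found then pvGoA prop val rest (some item) true
        else (found, ret)  -- raise ConfigMultipleItemsError: excluded by Pre_
      else pvGoA prop val rest ret found

def filter_sequence_py (sequence : List (List (String × String))) (prop : String) (val : String) : Bool × (Option (List (String × String))) :=
  pvGoA prop val sequence none false

-- ===== PORT B =====
-- B: one pass building index : value ↦ list of items with that value for prop, then one lookup.
def pvIndex (prop : String) (sequence : List (List (String × String))) :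
    PySem.Dict (Option String) (List (List (String × String))) :=
  sequence.foldl (fun d item => d.modify (pvItemGet item prop) [] (· ++ [item])) PySem.Dict.empty

def filter_sequence_py_alt (sequence : List (List (String × String))) (prop : String) (val : String) : Bool × (Option (List (String × String))) :=
  let ms := (pvIndex prop sequence).getD (some val) []
  -- if len(ms) > 1: raise ConfigMultipleItemsError (excluded by Pre_)
  (decide (ms ≠ []), ms.head?)

-- ===== PRECONDITION & SPEC =====
-- Pre_ excludes exactly the inputs with more than one matching item, on which both A and B raise ConfigMultipleItemsError.
def Pre_filter_sequence_py (sequence : List (List (String × String))) (prop : String) (val : String) : Prop :=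
  (sequence.filter (fun item => pvItemGet item prop == some val)).length ≤ 1
instance (sequence : List (List (String × String))) (prop : String) (val : String) : Decidable (Pre_filter_sequence_py sequence prop val) := by unfold Pre_filter_sequence_py; infer_instance

def pvWitness_filter_sequence_py : (List (List (String × String))) × String × String :=
  ([[("name", "a")], [("name", "b")]], "name", "b")

def Spec_filter_sequence_py (sequence : List (List (String × String))) (prop : String) (val : String) (out : Bool × (Option (List (String × String)))) : Prop := out = filter_sequence_py_alt sequence prop val
instance (sequence : List (List (String × String))) (prop : String) (val : String) (out : Bool × (Option (List (String × String)))) : Decidable (Spec_filter_sequence_py sequence prop val out) := by unfold Spec_filter_sequence_py; infer_instance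

-- ===== CLAIM (what is proved, stated in full; the proofs are below) =====
def Claim_equal_filter_sequence_py : Prop := ∀ (sequence : List (List (String × String))) (prop : String) (val : String), Dom_filter_sequence_py sequence prop val → Pre_filter_sequence_py sequence prop val → Spec_filter_sequence_py sequence prop val (filter_sequence_py sequence prop val)

-- ===== LEMMAS AND PROOFS =====
-- the grouping fold: the bucket of k collects exactly the items whose key is k, in order
theorem pvIndex_getD (prop : String) (k : Option String)
    (seq : List (List (String × String)))
    (d : PySem.Dict (Option String) (List (List (String × String)))) :
    (seq.foldl (fun d item => d.modify (pvItemGet item prop) [] (· ++ [item])) d).getD k [] =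
      d.getD k [] ++ seq.filter (fun item => pvItemGet item prop == k) := by
  induction seq generalizing d with
  | nil => simp
  | cons item rest ih =>
    rw [List.foldl_cons, ih, List.filter_cons]
    by_cases hm : (pvItemGet item prop == k) = true
    · have hk : pvItemGet item prop = k := by simpa using hm
      rw [if_pos hm, hk, PySem.Dict.getD_modify_self]
      simp
    · have hk : k ≠ pvItemGet item prop := by
        intro h; exact hm (by simp [h])
      rw [if_neg hm]
      exact congrArg (· ++ _) (PySem.Dict.getD_modify_of_ne _ _ _ hk)

-- once found and no further match remains, A's scan just carries its state to the end
theorem pvGoA_found (prop val : String) (seq : List (List (String × String))) (r : List (String × String))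
    (h : seq.filter (fun item => pvItemGet item prop == some val) = []) :
    pvGoA prop val seq (some r) true = (true, some r) := by
  induction seq with
  | nil => simp [pvGoA]
  | cons item rest ih =>
    rw [List.filter_cons] at h
    by_cases hm : (pvItemGet item prop == some val) = true
    · rw [if_pos hm] at h; exact absurd h (by simp)
    · rw [if_neg hm] at h
      simp [pvGoA, hm, ih h]

-- A's scan, characterised by the list of matches (of length ≤ 1)
theorem pvGoA_eq (prop val : String) (seq : List (List (String × String)))
    (h : (seq.filter (fun item => pvItemGet item prop == some val)).length ≤ 1) :
    pvGoA prop val seq none false =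
      (decide ((seq.filter (fun item => pvItemGet item prop == some val)) ≠ []),
       (seq.filter (fun item => pvItemGet item prop == some val)).head?) := by
  induction seq with
  | nil => simp [pvGoA]
  | cons item rest ih =>
    by_cases hm : (pvItemGet item prop == some val) = true
    · have h1 : (rest.filter (fun item => pvItemGet item prop == some val)).length = 0 := by
        rw [List.filter_cons, if_pos hm, List.length_cons] at h; omega
      have hrest := List.length_eq_zero_iff.mp h1
      simp [pvGoA, hm, pvGoA_found prop val rest item hrest, hrest]
    · rw [List.filter_cons, if_neg hm] at h ⊢
      simp [pvGoA, hm, ih h]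

-- ===== VERDICT =====
theorem filter_sequence_py_spec : Claim_equal_filter_sequence_py := by
  intro sequence prop val _ hpre
  unfold Spec_filter_sequence_py filter_sequence_py filter_sequence_py_alt pvIndex
  rw [pvIndex_getD, PySem.Dict.getD_empty, List.nil_append]
  exact pvGoA_eq prop val sequence hpre
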